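-- pv_equiv track=rewrite | github.com/MiaSanMia420/Musiala | processdata.py | process
-- ===== SOURCE A (Python) =====
-- def process(data):
--     odd_counts = []
--     no_odd_nums = []
--     for num in data:
--         str_num = str(num)
--         odd_count = sum(1 for digit in str_num if int(digit) % 2 != 0)
--         odd_counts.append(odd_count)
--         if odd_count == 0:
--             no_odd_nums.append(num)
--     avg = sum(no_odd_nums) // len(no_odd_nums) if no_odd_nums else 0
--     odd_counts.append(avg)
--     return odd_counts
-- ===== SOURCE B (Python) =====
-- def _odd_digits(n):
--     # arithmetic digit extraction on |n|: no string conversion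
--     n = abs(n)
--     count = 0
--     while n:
--         if n % 10 % 2:
--             count += 1
--         n //= 10
--     return count
--
--
-- def process(data):
--     odd_counts = [_odd_digits(num) for num in data]
--     no_odd_nums = [num for num, c in zip(data, odd_counts) if c == 0]
--     avg = sum(no_odd_nums) // len(no_odd_nums) if no_odd_nums else 0
--     return odd_counts + [avg]
-- ===== Notes on version B (the rewrite author's own statement) =====
-- stated objective: alternative
-- what changed: replaces the single combined loop that converts each number to a string and parses each digit character with a two-pass decomposition over a precomputed table of odd-digit counts obtained by arithmetic digit extraction (divmod by 10), no string conversion at all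
-- crash fix: on any input containing a negative number A raises ValueError (int('-') on the sign character) while B returns the odd-digit counts of the absolute values, e.g. at the witness [-3] a count of 1 followed by the average 0. — e.g. on process([-3]): A raises ValueError, B returns [1, 0]
import Mathlib
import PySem

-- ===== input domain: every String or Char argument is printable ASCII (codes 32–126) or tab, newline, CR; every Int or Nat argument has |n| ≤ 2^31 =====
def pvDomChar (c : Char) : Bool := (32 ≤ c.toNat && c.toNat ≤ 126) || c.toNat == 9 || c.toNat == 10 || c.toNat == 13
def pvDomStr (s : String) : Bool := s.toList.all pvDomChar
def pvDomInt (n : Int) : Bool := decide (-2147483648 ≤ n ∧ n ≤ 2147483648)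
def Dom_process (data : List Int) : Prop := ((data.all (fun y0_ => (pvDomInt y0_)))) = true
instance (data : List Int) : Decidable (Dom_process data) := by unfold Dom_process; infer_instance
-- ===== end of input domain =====

-- B replaces A's single string-parsing loop by arithmetic digit extraction plus a two-pass
-- table decomposition (alternative; return value only, no mutation involved).

-- ===== PORT A =====
-- int(digit) % 2 != 0 for one character `digit`; Python raises ValueError on '-' (those
-- inputs are excluded by Pre_process), so the total form getD 0 is used here.
def pvDigitOdd (c : Char) : Bool := PySem.Int.mod ((PySem.Int.ofChars? [c]).getD 0) 2 != 0

def process (data : List Int) : List Int :=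
  let st := data.foldl (fun (st : List Int × List Int) num =>
    let strNum := PySem.Int.toChars num                       -- str(num)
    let oddCount : Int := (strNum.countP pvDigitOdd : Int)    -- sum(1 for digit in str_num if …)
    let oddCounts := st.1 ++ [oddCount]
    let noOddNums := if oddCount == 0 then st.2 ++ [num] else st.2
    (oddCounts, noOddNums)) ([], [])
  let avg : Int := if st.2.isEmpty then 0
                   else PySem.Int.floordiv st.2.sum (PySem.List.len st.2)
  st.1 ++ [avg]

-- ===== PORT B =====
-- the while-loop of _odd_digits on |n| (arithmetic digit extraction)
def oddDigitsNat (m : Nat) : Nat :=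
  if m = 0 then 0
  else (if m % 10 % 2 ≠ 0 then 1 else 0) + oddDigitsNat (m / 10)
decreasing_by exact Nat.div_lt_self (Nat.pos_of_ne_zero (by assumption)) (by norm_num)

def oddDigits (n : Int) : Int := (oddDigitsNat n.natAbs : Int)

def process_alt (data : List Int) : List Int :=
  let oddCounts := data.map oddDigits
  let noOddNums := ((data.zip oddCounts).filter fun nc => nc.2 == 0).map Prod.fst
  let avg : Int := if noOddNums.isEmpty then 0
                   else PySem.Int.floordiv noOddNums.sum (PySem.List.len noOddNums)
  oddCounts ++ [avg]

-- ===== PRECONDITION & SPEC =====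
-- Pre_ excludes inputs containing a negative number: there str(num) starts with '-' and
-- int('-') raises ValueError in A.
def Pre_process (data : List Int) : Prop := ∀ x ∈ data, 0 ≤ x
instance (data : List Int) : Decidable (Pre_process data) := by unfold Pre_process; infer_instance
def pvWitness_process : List Int := [12, 20, 0, 345]

-- On any input containing a negative number A raises ValueError (int('-')) while B returns
-- the odd-digit counts of the absolute values.
def Raises_process (data : List Int) : Prop := ∃ x ∈ data, x < 0
instance (data : List Int) : Decidable (Raises_process data) := by unfold Raises_process; infer_instance
def pvRaiseWitness_process : List Int := [-3]
def pvRaiseWitnessOut_process : List Int := [1, 0]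

def Spec_process (data : List Int) (out : List Int) : Prop := out = process_alt data
instance (data : List Int) (out : List Int) : Decidable (Spec_process data out) := by unfold Spec_process; infer_instance

-- ===== CLAIM (what is proved, stated in full; the proofs are below) =====
def Claim_equal_process : Prop := ∀ (data : List Int), Dom_process data → Pre_process data → Spec_process data (process data)
def Claim_raises_process : Prop := (∀ (data : List Int), Dom_process data → Raises_process data → ¬ Pre_process data) ∧ (Dom_process (pvRaiseWitness_process) ∧ Raises_process (pvRaiseWitness_process) ∧ process_alt (pvRaiseWitness_process) = pvRaiseWitnessOut_process)

-- ===== LEMMAS AND PROOFS =====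

-- odd-digit predicate on a digit character agrees with arithmetic parity
lemma pvDigitOdd_digitChar (d : Nat) (hd : d < 10) :
    pvDigitOdd (Nat.digitChar d) = decide (d % 2 ≠ 0) := by
  interval_cases d <;> decide

-- an unexpanded form of one step of the while loop (covers m = 0 too)
lemma oddDigitsNat_step (m : Nat) :
    (if m % 10 % 2 ≠ 0 then 1 else 0) + oddDigitsNat (m / 10) = oddDigitsNat m := by
  by_cases h : m = 0
  · subst h; simp [oddDigitsNat]
  · rw [oddDigitsNat.eq_def m]; simp [h]

-- toDigitsCore counted by pvDigitOdd is the arithmetic odd-digit count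
lemma countP_toDigitsCore (fuel : Nat) :
    ∀ (m : Nat) (acc : List Char), m < fuel →
      (Nat.toDigitsCore 10 fuel m acc).countP pvDigitOdd
        = (if m % 10 % 2 ≠ 0 then 1 else 0) + oddDigitsNat (m / 10) + acc.countP pvDigitOdd := by
  induction fuel with
  | zero => intro m acc h; omega
  | succ fuel ih =>
    intro m acc h
    rw [Nat.toDigitsCore]
    by_cases h0 : m / 10 = 0
    · simp only [h0, if_true]
      rw [List.countP_cons]
      rw [pvDigitOdd_digitChar (m % 10) (Nat.mod_lt _ (by norm_num))]
      simp [oddDigitsNat]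
      split_ifs <;> omega
    · simp only [h0, if_false]
      have hm10 : m / 10 < m := Nat.div_lt_self (by omega) (by norm_num)
      rw [ih (m / 10) _ (by omega)]
      rw [List.countP_cons]
      rw [pvDigitOdd_digitChar (m % 10) (Nat.mod_lt _ (by norm_num))]
      rw [oddDigitsNat_step (m / 10)]
      by_cases hp : m % 10 % 2 = 0 <;> simp [hp] <;> omega

-- A's per-number digit count equals B's, for nonnegative numbers
lemma count_eq (n : Int) (hn : 0 ≤ n) :
    ((PySem.Int.toChars n).countP pvDigitOdd : Int) = oddDigits n := by
  have hneg : ¬ n < 0 := by omega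
  rw [PySem.Int.toChars, if_neg hneg, Nat.toDigits,
      countP_toDigitsCore (n.toNat + 1) n.toNat [] (by omega)]
  rw [oddDigitsNat_step n.toNat]
  have : n.toNat = n.natAbs := by omega
  simp [oddDigits, this]

-- A's fold builds exactly the map and the filter
lemma fold_eq (data : List Int) (hpre : ∀ x ∈ data, 0 ≤ x) :
    ∀ (a b : List Int),
      data.foldl (fun (st : List Int × List Int) num =>
        (st.1 ++ [((PySem.Int.toChars num).countP pvDigitOdd : Int)],
         if ((PySem.Int.toChars num).countP pvDigitOdd : Int) == 0 then st.2 ++ [num] else st.2))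
        (a, b)
      = (a ++ data.map oddDigits, b ++ data.filter (fun n => oddDigits n == 0)) := by
  induction data with
  | nil => intro a b; simp
  | cons x xs ih =>
    intro a b
    have hx : ((PySem.Int.toChars x).countP pvDigitOdd : Int) = oddDigits x :=
      count_eq x (hpre x (by simp))
    simp only [List.foldl_cons, List.map_cons, List.filter_cons, hx]
    rw [ih (fun y hy => hpre y (by simp [hy]))]
    by_cases h : oddDigits x == 0 <;> simp [h]

-- zip-with-its-own-map then filter-on-second then project = plain filter
lemma zip_filter_eq (data : List Int) :
    ((data.zip (data.map oddDigits)).filter fun nc => nc.2 == 0).map Prod.fst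
      = data.filter (fun n => oddDigits n == 0) := by
  induction data with
  | nil => rfl
  | cons x xs ih =>
    simp only [List.map_cons, List.zip_cons_cons, List.filter_cons]
    by_cases h : oddDigits x == 0 <;> simp [h, ih]

-- ===== VERDICT (by name: the statement is the Claim_ definition above) =====
theorem process_spec : Claim_equal_process := by
  intro data _ hpre
  unfold Spec_process process process_alt
  simp only []
  rw [fold_eq data hpre [] [], zip_filter_eq]
  simp

@[simp]
theorem process_raises : Claim_raises_process := by
  unfold Claim_raises_process
  refine ⟨?_, ⟨by decide, by decide, ?_⟩⟩
  · intro data _ ⟨x, hx, hneg⟩ hpre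
    exact absurd (hpre x hx) (by omega)
  · show process_alt [-3] = [1, 0]
    have h3 : oddDigitsNat 3 = 1 := by
      rw [oddDigitsNat.eq_def]; norm_num
      rw [oddDigitsNat.eq_def]; norm_num
    simp [process_alt, oddDigits, h3]
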